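-- pv_equiv track=rewrite | github.com/wamdam/backy2 | src/backy2/fuse.py | block_list
-- ===== SOURCE A (Python) =====
-- def block_list(offset, length, blocksize=4*1024*1024):
--     # calculates a list to read data from based on a given blocksize
--     # Returns a list of (block_id, offset, length)
--     block_number = offset // blocksize
--     block_offset = offset % blocksize
--
--     read_list = []
--     while True:
--         read_length = min(length, blocksize-block_offset)
--         read_list.append((block_number, block_offset, read_length))
--         block_offset = 0
--         length -= read_length
--         block_number += 1
--         assert length >= 0
--         if length == 0:
--             break
--
--     return read_list
-- ===== SOURCE B (Python) =====
-- def block_list(offset, length, blocksize=4*1024*1024):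
--     # Arithmetic first/middle/tail construction instead of a state-mutating loop.
--     block_number, block_offset = divmod(offset, blocksize)
--     first = min(length, blocksize - block_offset)
--     full, tail = divmod(length - first, blocksize)
--     read_list = [(block_number, block_offset, first)]
--     read_list += [(block_number + 1 + i, 0, blocksize) for i in range(full)]
--     if tail:
--         read_list.append((block_number + 1 + full, 0, tail))
--     return read_list
-- ===== Notes on version B (the rewrite author's own statement) =====
-- stated objective: simpler
-- what changed: Replaces the sequential state-mutating while-True loop with a closed-form first/middle/tail construction: the first (possibly partial) read, divmod of the remainder into full blocks built by a comprehension, and an optional tail tuple.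
-- outside the precondition, e.g. on block_list(0, -5, -3): A returns [(0, 0, -5)], B returns [(0, 0, -5)]; on block_list(0, 1, 0): A raises ZeroDivisionError, B raises ZeroDivisionError; on block_list(0, 3, -10): A does not finish within the time limit, B returns [(0, 0, -10), (-1, 0, -7)]
import Mathlib
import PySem

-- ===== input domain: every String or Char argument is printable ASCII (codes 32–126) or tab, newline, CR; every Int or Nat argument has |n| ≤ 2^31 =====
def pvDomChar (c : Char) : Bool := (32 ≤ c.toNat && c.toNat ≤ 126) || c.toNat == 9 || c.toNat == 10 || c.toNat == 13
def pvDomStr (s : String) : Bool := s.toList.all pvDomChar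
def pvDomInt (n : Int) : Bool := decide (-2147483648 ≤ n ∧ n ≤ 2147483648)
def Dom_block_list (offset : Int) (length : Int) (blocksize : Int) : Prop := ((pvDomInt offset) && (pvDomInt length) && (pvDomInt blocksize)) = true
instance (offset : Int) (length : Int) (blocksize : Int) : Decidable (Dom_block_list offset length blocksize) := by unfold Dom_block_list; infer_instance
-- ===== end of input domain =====

-- B replaces A's state-mutating while-loop by an arithmetic first/middle/tail construction (simpler, same cost).


-- ===== PORT A =====
-- A's `while True` loop; fuel `length.toNat + 1` strictly bounds the number of
-- iterations on every input admitted by Pre_ (each iteration after the first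
-- consumes at least 1 when blocksize > 0), so the port computes exactly A's run.
def blockLoop (fuel : Nat) (block_number block_offset length blocksize : Int)
    (acc : List (Int × Int × Int)) : List (Int × Int × Int) :=
  match fuel with
  | 0 => acc
  | f + 1 =>
    let read_length := min length (blocksize - block_offset)
    let acc' := acc ++ [(block_number, block_offset, read_length)]
    let length' := length - read_length
    if length' = 0 then acc'
    else blockLoop f (block_number + 1) 0 length' blocksize acc'

def block_list (offset : Int) (length : Int) (blocksize : Int) : List (Int × Int × Int) :=
  blockLoop (length.toNat + 1) (PySem.Int.floordiv offset blocksize)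
    (PySem.Int.mod offset blocksize) length blocksize []

-- ===== PORT B =====
def block_list_alt (offset : Int) (length : Int) (blocksize : Int) : List (Int × Int × Int) :=
  let block_number := PySem.Int.floordiv offset blocksize
  let block_offset := PySem.Int.mod offset blocksize
  let first := min length (blocksize - block_offset)
  let full := PySem.Int.floordiv (length - first) blocksize
  let tail := PySem.Int.mod (length - first) blocksize
  ((block_number, block_offset, first) ::
    (PySem.List.pyRange 0 full 1).map (fun i => (block_number + 1 + i, (0 : Int), blocksize))) ++
  (if tail = 0 then [] else [(block_number + 1 + full, 0, tail)])

-- ===== PRECONDITION & SPEC =====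
-- Pre_ restricts to the natural domain of a positive blocksize: A raises
-- ZeroDivisionError at blocksize = 0 and loops forever for blocksize < 0 except
-- on degenerate negative lengths, where both programs return the same value.
def Pre_block_list (offset : Int) (length : Int) (blocksize : Int) : Prop := 0 < blocksize
instance (offset : Int) (length : Int) (blocksize : Int) : Decidable (Pre_block_list offset length blocksize) := by unfold Pre_block_list; infer_instance
def pvWitness_block_list : Int × Int × Int := (5, 10, 4)

def Spec_block_list (offset : Int) (length : Int) (blocksize : Int) (out : List (Int × Int × Int)) : Prop := out = block_list_alt offset length blocksize
instance (offset : Int) (length : Int) (blocksize : Int) (out : List (Int × Int × Int)) : Decidable (Spec_block_list offset length blocksize out) := by unfold Spec_block_list; infer_instance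

-- ===== CLAIM (what is proved, stated in full; the proofs are below) =====
def Claim_equal_block_list : Prop := ∀ (offset : Int) (length : Int) (blocksize : Int), Dom_block_list offset length blocksize → Pre_block_list offset length blocksize → Spec_block_list offset length blocksize (block_list offset length blocksize)

-- ===== LEMMAS AND PROOFS =====

-- The index-shift of the full-block map used when peeling one block off the loop.
lemma map_pyRange_shift (bn bs q : Int) (hq : 1 ≤ q) :
    List.map (fun i => (bn + i, (0 : Int), bs)) (PySem.List.pyRange 0 q 1) =
      (bn, 0, bs) :: List.map (fun i => (bn + 1 + i, (0 : Int), bs)) (PySem.List.pyRange 0 (q - 1) 1) := by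
  obtain ⟨n, rfl⟩ : ∃ n : Nat, q = (n : Int) + 1 := ⟨(q - 1).toNat, by omega⟩
  have h1 : ((n : Int) + 1) = ((n + 1 : Nat) : Int) := by push_cast; ring
  have h2 : ((n : Int) + 1 - 1) = ((n : Nat) : Int) := by ring
  rw [h2, h1, PySem.List.pyRange_zero_natCast, PySem.List.pyRange_zero_natCast,
    List.range_succ_eq_map]
  simp only [List.map_cons, List.map_map, Function.comp]
  congr 1
  · simp
  · exact List.map_congr_left fun k _ => by
      simp only [Function.comp_apply, Nat.succ_eq_add_one]
      push_cast
      ring_nf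

-- Characterisation of A's loop once the offset has been reset to 0.
lemma blockLoop_zero (bs : Int) (hbs : 0 < bs) :
    ∀ (fuel : Nat) (len bn : Int) (acc : List (Int × Int × Int)),
      0 < len → len.toNat ≤ fuel →
      blockLoop fuel bn 0 len bs acc =
        acc ++ (PySem.List.pyRange 0 (PySem.Int.floordiv len bs) 1).map
            (fun i => (bn + i, (0 : Int), bs)) ++
          (if PySem.Int.mod len bs = 0 then []
           else [(bn + PySem.Int.floordiv len bs, 0, PySem.Int.mod len bs)]) := by
  intro fuel
  induction fuel with
  | zero => intro len bn acc hlen hfuel; omega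
  | succ f ih =>
    intro len bn acc hlen hfuel
    rw [PySem.Int.floordiv_eq_ediv_of_pos hbs, PySem.Int.mod_eq_emod_of_pos hbs]
    by_cases h : len ≤ bs
    · by_cases he : len = bs
      · subst he
        simp [blockLoop, Int.ediv_self (by omega : len ≠ 0), PySem.List.pyRange]
      · have hlt : len < bs := lt_of_le_of_ne h he
        have hd : len / bs = 0 := Int.ediv_eq_zero_of_lt (by omega) hlt
        have hm : len % bs = len := Int.emod_eq_of_lt (by omega) hlt
        simp [blockLoop, min_eq_left h, hd, hm]
        omega
    · have h : bs < len := by omega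
      have hrec : blockLoop (f + 1) bn 0 len bs acc =
          blockLoop f (bn + 1) 0 (len - bs) bs (acc ++ [(bn, 0, bs)]) := by
        simp only [blockLoop, sub_zero, min_eq_right (le_of_lt h)]
        rw [if_neg (by omega)]
      rw [hrec, ih (len - bs) (bn + 1) _ (by omega) (by omega)]
      rw [PySem.Int.floordiv_eq_ediv_of_pos hbs, PySem.Int.mod_eq_emod_of_pos hbs]
      have hq1 : (len - bs) / bs = len / bs - 1 := by
        have := Int.add_mul_ediv_right len (-1) (by omega : bs ≠ 0)
        have heq : len + -1 * bs = len - bs := by ring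
        rw [heq] at this; omega
      have hm1 : (len - bs) % bs = len % bs := Int.sub_emod_right len bs
      have hge : 1 ≤ len / bs := by
        have := (Int.le_ediv_iff_mul_le hbs).mpr (by omega : 1 * bs ≤ len)
        omega
      rw [hq1, hm1, map_pyRange_shift bn bs (len / bs) hge]
      split_ifs with h0 <;>
        simp [List.append_assoc, show bn + 1 + (len / bs - 1) = bn + len / bs from by ring]

theorem block_list_spec : Claim_equal_block_list := by
  intro o l bs _ hbs
  have hbs : (0 : Int) < bs := hbs
  unfold Spec_block_list block_list block_list_alt
  have hbo0 : 0 ≤ PySem.Int.mod o bs := PySem.Int.mod_nonneg o hbs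
  have hbolt : PySem.Int.mod o bs < bs := PySem.Int.mod_lt o hbs
  by_cases hc : l ≤ bs - PySem.Int.mod o bs
  · rw [PySem.Int.mod_eq_emod_of_pos hbs] at hc
    simp [blockLoop, min_eq_left hc, PySem.Int.floordiv_eq_ediv_of_pos hbs,
      PySem.Int.mod_eq_emod_of_pos hbs, PySem.List.pyRange]
  · have hc' : bs - PySem.Int.mod o bs < l := by omega
    have hstep : blockLoop (l.toNat + 1) (PySem.Int.floordiv o bs) (PySem.Int.mod o bs) l bs [] =
        blockLoop l.toNat (PySem.Int.floordiv o bs + 1) 0 (l - (bs - PySem.Int.mod o bs)) bs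
          [(PySem.Int.floordiv o bs, PySem.Int.mod o bs, bs - PySem.Int.mod o bs)] := by
      simp only [blockLoop, min_eq_right (le_of_lt hc'), List.nil_append]
      rw [if_neg (by omega)]
    rw [hstep, blockLoop_zero bs hbs l.toNat _ _ _ (by omega) (by omega)]
    simp [min_eq_right (le_of_lt hc'), List.append_assoc]
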